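-- pv_equiv track=rewrite | github.com/ankikadey/Competetive-Coding-and-Interview-Questions | Hash Table/QuestionMarks.py | QuestionsMarks
-- ===== SOURCE A (Python) =====
-- def QuestionsMarks(s):
--     count_q = 0
--     a = 0
--     start_count = False
--     true_exist = False
--     for i in s:
--         if start_count and i == '?':
--             count_q += 1
--         if i.isdigit():
--             a += int(i)
--             if a==10 and count_q == 3:
--                 true_exist = True
--             if start_count and a == 10 and count_q != 3:
--                 return 'false'
--             a = int(i)
--             count_q = 0
--             start_count = True
--     return 'true' if true_exist else 'false'
-- ===== SOURCE B (Python) =====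
-- def QuestionsMarks(s):
--     # Pass 1: collect (digit_value, number_of_'?'_since_previous_digit) pairs.
--     pairs = []
--     q = 0
--     for c in s:
--         if c.isdigit():
--             pairs.append((int(c), q))
--             q = 0
--         elif c == '?':
--             q += 1
--     # Pass 2: check consecutive digit pairs.
--     found = False
--     for i in range(1, len(pairs)):
--         if pairs[i - 1][0] + pairs[i][0] == 10:
--             if pairs[i][1] == 3:
--                 found = True
--             else:
--                 return 'false'
--     return 'true' if found else 'false'
-- ===== Notes on version B (the rewrite author's own statement) =====
-- stated objective: alternative
-- what changed: B splits the task into two passes: it first compresses the string into a list of (digit, question-marks-since-previous-digit) pairs, then judges only consecutive digit pairs, instead of A's single scan threading count_q/a/start_count flags through every character.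
import Mathlib
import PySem

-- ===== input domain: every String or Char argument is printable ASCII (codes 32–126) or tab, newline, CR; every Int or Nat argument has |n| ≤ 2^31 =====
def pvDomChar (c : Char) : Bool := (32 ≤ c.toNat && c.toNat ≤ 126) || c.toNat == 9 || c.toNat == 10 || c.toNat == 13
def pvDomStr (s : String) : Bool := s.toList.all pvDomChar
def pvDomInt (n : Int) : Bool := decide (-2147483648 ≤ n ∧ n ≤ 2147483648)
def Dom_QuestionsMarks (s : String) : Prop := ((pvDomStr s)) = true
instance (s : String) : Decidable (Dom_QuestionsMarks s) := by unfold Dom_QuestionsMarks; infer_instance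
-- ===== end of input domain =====

-- B recomputes the same answer in two passes (compress to (digit, ?-count) pairs, then judge
-- consecutive pairs) instead of A's single flag-threaded scan; objective: alternative decomposition.


-- ===== PORT A =====
-- int(i) for a single digit char i: exact as (toNat - 48) since PySem.Chars.isdigit guards '0'..'9'.
def qmDigitVal (c : Char) : Int := (c.toNat : Int) - 48

-- A's loop: state (count_q, a, start_count, true_exist), early return 'false' kept as a direct return.
def qmLoopA : List Char → Int → Int → Bool → Bool → String
  | [], _, _, _, true_exist => if true_exist then "true" else "false"
  | c :: rest, count_q, a, start_count, true_exist =>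
    let count_q := if start_count && (c == '?') then count_q + 1 else count_q
    if PySem.Chars.isdigit c then
      let a := a + qmDigitVal c
      let true_exist := if a = 10 ∧ count_q = 3 then true else true_exist
      if start_count ∧ a = 10 ∧ count_q ≠ 3 then "false"
      else qmLoopA rest 0 (qmDigitVal c) true true_exist
    else qmLoopA rest count_q a start_count true_exist

def QuestionsMarks (s : String) : String := qmLoopA s.toList 0 0 false false

-- ===== PORT B =====
-- Pass 1 of Source B: list of (digit value, '?' seen since the previous digit).
def qmPairs : List Char → Int → List (Int × Int)
  | [], _ => []
  | c :: rest, q =>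
    if PySem.Chars.isdigit c then (qmDigitVal c, q) :: qmPairs rest 0
    else if c == '?' then qmPairs rest (q + 1)
    else qmPairs rest q

-- Pass 2 of Source B: walk consecutive pairs (the range(1, len) loop, as structural recursion with
-- the previous digit carried along).
def qmScan : Int → List (Int × Int) → Bool → String
  | _, [], found => if found then "true" else "false"
  | prev, p :: rest, found =>
    if prev + p.1 = 10 then
      if p.2 = 3 then qmScan p.1 rest true else "false"
    else qmScan p.1 rest found

def QuestionsMarks_alt (s : String) : String :=
  match qmPairs s.toList 0 with
  | [] => "false"
  | p :: rest => qmScan p.1 rest false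

-- ===== PRECONDITION & SPEC =====
def Spec_QuestionsMarks (s : String) (out : String) : Prop := out = QuestionsMarks_alt s
instance (s : String) (out : String) : Decidable (Spec_QuestionsMarks s out) := by unfold Spec_QuestionsMarks; infer_instance

-- ===== CLAIM (what is proved, stated in full; the proofs are below) =====
def Claim_equal_QuestionsMarks : Prop := ∀ (s : String), Dom_QuestionsMarks s → Spec_QuestionsMarks s (QuestionsMarks s)

-- ===== LEMMAS AND PROOFS =====

theorem qmDigitVal_lt_ten (c : Char) (h : PySem.Chars.isdigit c = true) : qmDigitVal c < 10 := by
  simp [PySem.Chars.isdigit, Char.le_def, UInt32.le_iff_toNat_le] at h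
  simp [qmDigitVal]
  omega

-- After the first digit: A's loop with previous digit `prev` and pending count `cq` equals
-- B's scan of the remaining pairs.
theorem qmLoopA_started (l : List Char) : ∀ (cq prev : Int) (te : Bool),
    qmLoopA l cq prev true te = qmScan prev (qmPairs l cq) te := by
  induction l with
  | nil => intro cq prev te; simp [qmLoopA, qmPairs, qmScan]
  | cons c rest ih =>
    intro cq prev te
    by_cases hd : PySem.Chars.isdigit c = true
    · have hq : (c == '?') = false := by
        simp [PySem.Chars.isdigit] at hd
        simp only [beq_eq_false_iff_ne, ne_eq]
        rintro rfl; revert hd; decide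
      simp only [qmLoopA, qmPairs, hd, hq, Bool.and_false, if_true]
      by_cases h10 : prev + qmDigitVal c = 10
      · by_cases h3 : cq = 3
        · simp [qmScan, h10, h3, ih]
        · simp [qmScan, h10, h3]
      · simp [qmScan, h10, ih]
    · simp only [qmLoopA, qmPairs, hd, Bool.true_and]
      by_cases hq : (c == '?') = true
      · simp [hq, ih]
      · simp at hq
        simp [hq, ih]

-- Before the first digit: a = 0, so no pair sum can reach 10; both sides just skip to the
-- first digit (A's dead count_q and B's dead leading '?'-count may differ, hence the two
-- universally quantified counters).
theorem qmLoopA_unstarted (l : List Char) : ∀ (cq q : Int),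
    qmLoopA l cq 0 false false =
      (match qmPairs l q with
       | [] => "false"
       | p :: rest => qmScan p.1 rest false) := by
  induction l with
  | nil => intro cq q; simp [qmLoopA, qmPairs]
  | cons c rest ih =>
    intro cq q
    by_cases hd : PySem.Chars.isdigit c = true
    · have hlt := qmDigitVal_lt_ten c hd
      have h10 : qmDigitVal c ≠ 10 := by omega
      simp [qmLoopA, qmPairs, hd, h10, qmLoopA_started]
    · have hd' : PySem.Chars.isdigit c = false := by simpa using hd
      rcases Bool.eq_false_or_eq_true (c == '?') with hq | hq
      · simp only [qmLoopA, qmPairs, hd', hq]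
        simp only [Bool.false_and, Bool.false_eq_true, if_false]
        exact ih cq (q + 1)
      · simp only [qmLoopA, qmPairs, hd', hq]
        simp only [Bool.false_and, Bool.false_eq_true, if_false]
        exact ih cq q

-- ===== VERDICT (by name: the statement is the Claim_ definition above) =====
theorem QuestionsMarks_spec : Claim_equal_QuestionsMarks := by
  intro s _
  show QuestionsMarks s = QuestionsMarks_alt s
  unfold QuestionsMarks QuestionsMarks_alt
  exact qmLoopA_unstarted s.toList 0 0
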